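-- pv_equiv track=rewrite | github.com/rhgrant10/advent-of-code_python | aoc/problems/y2018_d11.py | find_max_location
-- ===== SOURCE A (Python) =====
-- def find_max_location(grid, window):
--     greatest = None
--     top_left = None
--     for y in range(len(grid) - window):
--         for x in range(len(grid[y]) - window):
--             power = 0
--             for dy in range(window):
--                 for dx in range(window):
--                     power += grid[y + dy][x + dx]
--
--             if greatest is None or greatest < power:
--                 greatest = power
--                 top_left = x, y
--     return top_left
-- ===== SOURCE B (Python) =====
-- def find_max_location(grid, window):
--     h = len(grid)
--     w = len(grid[0]) if grid else 0
--     if h - window <= 0 or w - window <= 0: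
--         return None  # no window position fits
--     # summed-area table: S[i][j] = sum of grid[y][x] for y < i, x < j
--     S = [[0] * (w + 1)]
--     for row in grid:
--         prev = S[-1]
--         cur = [0]
--         run = 0
--         for j, v in enumerate(row):
--             run += v
--             cur.append(prev[j + 1] + run)
--         S.append(cur)
--     best = None
--     loc = None
--     for y in range(h - window):
--         for x in range(w - window):
--             total = (S[y + window][x + window] - S[y][x + window]
--                      - S[y + window][x] + S[y][x])
--             if best is None or total > best:
--                 best = total
--                 loc = (x, y)
--     return loc
-- ===== Notes on version B (the rewrite author's own statement) =====
-- stated objective: alternative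
-- what changed: B precomputes a 2D prefix-sum (summed-area) table once and reads each window sum in O(1) by inclusion-exclusion, replacing A's per-position rescan of the whole window.
-- outside the precondition, e.g. on find_max_location([[1, 2], [3, 4, 5]], 1): A returns (0, 0), B raises IndexError
import Mathlib
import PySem

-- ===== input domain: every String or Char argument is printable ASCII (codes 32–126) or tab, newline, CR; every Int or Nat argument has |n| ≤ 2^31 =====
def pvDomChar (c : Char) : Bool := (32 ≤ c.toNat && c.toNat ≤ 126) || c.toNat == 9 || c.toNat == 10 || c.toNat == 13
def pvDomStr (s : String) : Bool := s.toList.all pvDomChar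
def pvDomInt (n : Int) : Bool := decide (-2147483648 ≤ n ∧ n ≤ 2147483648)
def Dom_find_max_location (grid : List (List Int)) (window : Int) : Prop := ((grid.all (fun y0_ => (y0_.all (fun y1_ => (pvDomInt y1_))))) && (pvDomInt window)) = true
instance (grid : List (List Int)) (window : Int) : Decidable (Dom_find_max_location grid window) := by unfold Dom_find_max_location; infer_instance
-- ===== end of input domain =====

-- B replaces A's per-position rescan of the whole window by a summed-area table read
-- with inclusion-exclusion — a different algorithm with the same result.

-- ===== PORT A =====
-- literal transliteration of A; grid[..] indexing uses pyGet?/pyGetD (in range under Pre_)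
def find_max_location (grid : List (List Int)) (window : Int) : Option (Int × Int) :=
  (((PySem.List.pyRange 0 ((grid.length : Int) - window) 1).foldl
    (fun (st : Option Int × Option (Int × Int)) y =>
      let row := (PySem.List.pyGet? grid y).getD []
      (PySem.List.pyRange 0 ((row.length : Int) - window) 1).foldl
        (fun st x =>
          let power := (PySem.List.pyRange 0 window 1).foldl
            (fun p dy => (PySem.List.pyRange 0 window 1).foldl
              (fun p dx =>
                p + PySem.List.pyGetD ((PySem.List.pyGet? grid (y + dy)).getD []) (x + dx) 0) p) 0
          match st.1 with
          | none => (some power, some (x, y))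
          | some greatest => if greatest < power then (some power, some (x, y)) else st) st)
    (none, none)).2 : Option (Int × Int))

-- ===== PORT B =====
-- cur = [0]; run = 0; for j, v in enumerate(row): run += v; cur.append(prev[j+1] + run)
def pvPrefixRow (prev row : List Int) : List Int :=
  ((PySem.List.enumerate row).foldl
    (fun (st : List Int × Int) jv =>
      let run := st.2 + jv.2
      (st.1 ++ [PySem.List.pyGetD prev (jv.1 + 1) 0 + run], run)) ([0], 0)).1

-- S = [[0]*(w+1)]; for row in grid: S.append(prefix of row on top of S[-1])
def pvBuildS (grid : List (List Int)) (w : Nat) : List (List Int) :=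
  grid.foldl (fun S row => S ++ [pvPrefixRow (PySem.List.pyGetD S (-1) []) row])
    [List.replicate (w + 1) 0]

def pvAt (S : List (List Int)) (i j : Int) : Int :=
  PySem.List.pyGetD (PySem.List.pyGetD S i []) j 0

def find_max_location_alt (grid : List (List Int)) (window : Int) : Option (Int × Int) :=
  let h := grid.length
  -- w = len(grid[0]) if grid else 0  (headD [] is grid[0], or [] for empty grid)
  let w := (grid.headD []).length
  if (h : Int) - window ≤ 0 ∨ (w : Int) - window ≤ 0 then none else
  let S := pvBuildS grid w
  (((PySem.List.pyRange 0 ((h : Int) - window) 1).foldl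
    (fun (st : Option Int × Option (Int × Int)) y =>
      (PySem.List.pyRange 0 ((w : Int) - window) 1).foldl
        (fun st x =>
          let total := pvAt S (y + window) (x + window) - pvAt S y (x + window)
                       - pvAt S (y + window) x + pvAt S y x
          match st.1 with
          | none => (some total, some (x, y))
          | some best => if total > best then (some total, some (x, y)) else st) st)
    (none, none)).2 : Option (Int × Int))

-- ===== PRECONDITION & SPEC =====
-- Pre_ restricts to the task's natural domain — a rectangular grid and a nonnegative window:
-- a negative window always makes A raise IndexError (grid[y] for y ≥ len(grid)), and on a
-- ragged grid A may raise or scan an accidental per-row subset of positions while B's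
-- summed-area table may itself raise.
def Pre_find_max_location (grid : List (List Int)) (window : Int) : Prop :=
  0 ≤ window ∧ ∀ row ∈ grid, row.length = (grid.headD []).length
instance (grid : List (List Int)) (window : Int) : Decidable (Pre_find_max_location grid window) := by
  unfold Pre_find_max_location; infer_instance

def pvWitness_find_max_location : List (List Int) × Int := ([[1, 2], [3, 4]], 1)

def Spec_find_max_location (grid : List (List Int)) (window : Int) (out : Option (Int × Int)) : Prop := out = find_max_location_alt grid window
instance (grid : List (List Int)) (window : Int) (out : Option (Int × Int)) : Decidable (Spec_find_max_location grid window out) := by unfold Spec_find_max_location; infer_instance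

-- ===== CLAIM (what is proved, stated in full; the proofs are below) =====
def Claim_equal_find_max_location : Prop := ∀ (grid : List (List Int)) (window : Int), Dom_find_max_location grid window → Pre_find_max_location grid window → Spec_find_max_location grid window (find_max_location grid window)

-- ===== LEMMAS AND PROOFS =====

-- cell, row-prefix-sum and box (summed-area) specifications
def pvCell (g : List (List Int)) (y x : Nat) : Int := (g.getD y []).getD x 0
def pvPSum (row : List Int) (j : Nat) : Int := ∑ x ∈ Finset.range j, row.getD x 0
def pvRSum (g : List (List Int)) (y j : Nat) : Int := pvPSum (g.getD y []) j
def pvBox (g : List (List Int)) (i j : Nat) : Int := ∑ y ∈ Finset.range i, pvRSum g y j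

lemma sum_map_range_int (f : Nat → Int) (n : Nat) :
    ((List.range n).map f).sum = ∑ i ∈ Finset.range n, f i := by
  induction n with
  | zero => simp
  | succ n ih => simp [List.range_succ, Finset.sum_range_succ, ih]

lemma psum_append_le (xs : List Int) (v : Int) (j : Nat) (h : j ≤ xs.length) :
    pvPSum (xs ++ [v]) j = pvPSum xs j := by
  unfold pvPSum
  refine Finset.sum_congr rfl (fun x hx => ?_)
  have hx' : x < xs.length := by
    have := Finset.mem_range.mp hx; omega
  rw [List.getD_append _ _ _ _ hx']

lemma psum_append_succ (xs : List Int) (v : Int) :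
    pvPSum (xs ++ [v]) (xs.length + 1) = pvPSum xs xs.length + v := by
  unfold pvPSum
  rw [Finset.sum_range_succ, List.getD_eq_getElem?_getD, List.getElem?_concat_length]
  have h : ∑ x ∈ Finset.range xs.length, (xs ++ [v]).getD x 0
      = ∑ x ∈ Finset.range xs.length, xs.getD x 0 := by
    refine Finset.sum_congr rfl (fun x hx => ?_)
    rw [List.getD_append _ _ _ _ (Finset.mem_range.mp hx)]
  rw [h]; rfl

lemma prefixRow_fold (prev row : List Int) :
    (PySem.List.enumerate row).foldl
      (fun (st : List Int × Int) jv =>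
        let run := st.2 + jv.2
        (st.1 ++ [PySem.List.pyGetD prev (jv.1 + 1) 0 + run], run)) ([0], 0)
    = ((List.range (row.length + 1)).map
         (fun (j : Nat) => if j = 0 then 0 else PySem.List.pyGetD prev (j : Int) 0 + pvPSum row j),
       pvPSum row row.length) := by
  induction row using List.reverseRecOn with
  | nil => simp [PySem.List.enumerate_nil, pvPSum]
  | append_singleton xs v ih =>
    rw [PySem.List.enumerate_append, List.foldl_append, ih]
    simp only [PySem.List.enumerate_cons, PySem.List.enumerate_nil, List.foldl_cons,
      List.foldl_nil, List.length_append, List.length_cons, List.length_nil]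
    rw [psum_append_succ]
    have hrange : List.range (xs.length + 1 + 1) = List.range (xs.length + 1) ++ [xs.length + 1] :=
      List.range_succ
    rw [hrange, List.map_append]
    have hmap : (List.range (xs.length + 1)).map
          (fun (j : Nat) => if j = 0 then 0 else PySem.List.pyGetD prev (j : Int) 0 + pvPSum (xs ++ [v]) j)
        = (List.range (xs.length + 1)).map
          (fun (j : Nat) => if j = 0 then 0 else PySem.List.pyGetD prev (j : Int) 0 + pvPSum xs j) := by
      refine List.map_congr_left (fun j hj => ?_)
      have hj' : j ≤ xs.length := by have := List.mem_range.mp hj; omega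
      rw [psum_append_le _ _ _ hj']
    rw [hmap]
    have h1 : ((0 : Int) + (xs.length : Int)) + 1 = ((xs.length + 1 : Nat) : Int) := by
      push_cast; ring
    simp only [List.map_cons, List.map_nil, Nat.succ_ne_zero, if_false, h1, psum_append_succ]

lemma prefixRow_eq (prev row : List Int) (w : Nat) (c : Nat → Int)
    (hprev : prev = (List.range (w + 1)).map c) (h0 : c 0 = 0) (hw : row.length = w) :
    pvPrefixRow prev row = (List.range (w + 1)).map (fun j => c j + pvPSum row j) := by
  unfold pvPrefixRow
  rw [prefixRow_fold, hw]
  refine List.map_congr_left (fun j hj => ?_)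
  have hj' : j < w + 1 := List.mem_range.mp hj
  by_cases hj0 : j = 0
  · subst hj0; simp [pvPSum, h0]
  · rw [if_neg hj0, hprev, PySem.List.pyGetD_natCast, PySem.List.getD_map_range _ _ _ _ hj']

lemma buildS_eq (grid : List (List Int)) (w : Nat)
    (hrect : ∀ row ∈ grid, row.length = w) :
    pvBuildS grid w
      = (List.range (grid.length + 1)).map
          (fun i => (List.range (w + 1)).map (fun j => pvBox grid i j)) := by
  induction grid using List.reverseRecOn with
  | nil =>
    unfold pvBuildS
    rw [List.foldl_nil]
    simp only [List.length_nil, Nat.zero_add, List.range_one, List.map_cons, List.map_nil]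
    congr 1
    symm
    rw [List.eq_replicate_iff]
    refine ⟨by simp, fun b hb => ?_⟩
    obtain ⟨j, hj, rfl⟩ := List.mem_map.mp hb
    simp [pvBox, pvRSum, pvPSum]
  | append_singleton gs r ih =>
    have hrect' : ∀ row ∈ gs, row.length = w := fun row hr => hrect row (by simp [hr])
    have hbox : ∀ i j : Nat, i ≤ gs.length → pvBox (gs ++ [r]) i j = pvBox gs i j := by
      intro i j hi
      refine Finset.sum_congr rfl (fun y hy => ?_)
      have hy' : y < gs.length := by have := Finset.mem_range.mp hy; omega
      unfold pvRSum
      rw [List.getD_append _ _ _ _ hy']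
    unfold pvBuildS at ih ⊢
    rw [List.foldl_append, List.foldl_cons, List.foldl_nil, ih hrect']
    have hlast : PySem.List.pyGetD
        ((List.range (gs.length + 1)).map
          (fun i => (List.range (w + 1)).map (fun j => pvBox gs i j))) (-1) []
        = (List.range (w + 1)).map (fun j => pvBox gs gs.length j) := by
      rw [List.range_succ (n := gs.length), List.map_append, List.map_cons, List.map_nil,
        PySem.List.pyGetD_neg_one_append_singleton]
    rw [hlast, prefixRow_eq _ _ w (fun j => pvBox gs gs.length j) rfl (by simp [pvBox, pvRSum, pvPSum]) (hrect r (by simp))]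
    have hnewrow : ∀ j : Nat, pvBox gs gs.length j + pvPSum r j = pvBox (gs ++ [r]) (gs.length + 1) j := by
      intro j
      unfold pvBox
      rw [Finset.sum_range_succ]
      have h1 : pvRSum (gs ++ [r]) gs.length j = pvPSum r j := by
        unfold pvRSum
        rw [List.getD_eq_getElem?_getD, List.getElem?_concat_length]
        rfl
      have h2 : ∑ y ∈ Finset.range gs.length, pvRSum (gs ++ [r]) y j
          = ∑ y ∈ Finset.range gs.length, pvRSum gs y j := by
        refine Finset.sum_congr rfl (fun y hy => ?_)
        unfold pvRSum
        rw [List.getD_append _ _ _ _ (Finset.mem_range.mp hy)]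
      rw [h1, h2]
    have hmapold : (List.range (gs.length + 1)).map
          (fun i => (List.range (w + 1)).map (fun j => pvBox gs i j))
        = (List.range (gs.length + 1)).map
          (fun i => (List.range (w + 1)).map (fun j => pvBox (gs ++ [r]) i j)) := by
      refine List.map_congr_left (fun i hi => ?_)
      refine List.map_congr_left (fun j _ => ?_)
      exact (hbox i j (by have := List.mem_range.mp hi; omega)).symm
    rw [hmapold]
    have hlen : (gs ++ [r]).length + 1 = (gs.length + 1) + 1 := by simp
    rw [hlen, List.range_succ (n := gs.length + 1), List.map_append, List.map_cons, List.map_nil]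
    congr 2
    refine List.map_congr_left (fun j _ => ?_)
    exact hnewrow j

lemma box_split (g : List (List Int)) (a b j : Nat) :
    pvBox g (a + b) j = pvBox g a j + ∑ k ∈ Finset.range b, pvRSum g (a + k) j := by
  simp [pvBox, Finset.sum_range_add]

lemma rsum_split (g : List (List Int)) (y c d : Nat) :
    pvRSum g y (c + d) = pvRSum g y c + ∑ j ∈ Finset.range d, pvCell g y (c + j) := by
  simp [pvRSum, pvPSum, pvCell, Finset.sum_range_add]

lemma box_diff (g : List (List Int)) (yn xn wn : Nat) :
    pvBox g (yn + wn) (xn + wn) - pvBox g yn (xn + wn) - pvBox g (yn + wn) xn + pvBox g yn xn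
      = ∑ k ∈ Finset.range wn, ∑ j ∈ Finset.range wn, pvCell g (yn + k) (xn + j) := by
  rw [box_split g yn wn (xn + wn), box_split g yn wn xn]
  have : ∀ k, pvRSum g (yn + k) (xn + wn) - pvRSum g (yn + k) xn
      = ∑ j ∈ Finset.range wn, pvCell g (yn + k) (xn + j) := by
    intro k; rw [rsum_split]; ring
  have h2 : ∑ k ∈ Finset.range wn, pvRSum g (yn + k) (xn + wn)
      - ∑ k ∈ Finset.range wn, pvRSum g (yn + k) xn
      = ∑ k ∈ Finset.range wn, ∑ j ∈ Finset.range wn, pvCell g (yn + k) (xn + j) := by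
    rw [← Finset.sum_sub_distrib]; exact Finset.sum_congr rfl (fun k _ => this k)
  linarith [h2]

lemma powerA_eq (grid : List (List Int)) (wn yn xn : Nat)
    (hy : yn + wn ≤ grid.length) :
    (PySem.List.pyRange 0 (wn : Int) 1).foldl
      (fun p dy => (PySem.List.pyRange 0 (wn : Int) 1).foldl
        (fun p dx =>
          p + PySem.List.pyGetD ((PySem.List.pyGet? grid ((yn : Int) + dy)).getD []) ((xn : Int) + dx) 0) p) 0
    = ∑ k ∈ Finset.range wn, ∑ j ∈ Finset.range wn, pvCell grid (yn + k) (xn + j) := by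
  rw [PySem.List.pyRange_zero_natCast]
  simp only [List.foldl_map, PySem.List.foldl_add, zero_add]
  rw [sum_map_range_int]
  refine Finset.sum_congr rfl (fun k hk => ?_)
  rw [sum_map_range_int]
  refine Finset.sum_congr rfl (fun j hj => ?_)
  have hk' := Finset.mem_range.mp hk
  have hj' := Finset.mem_range.mp hj
  have c1 : (yn : Int) + (k : Int) = ((yn + k : Nat) : Int) := by push_cast; ring
  have c2 : (xn : Int) + (j : Int) = ((xn + j : Nat) : Int) := by push_cast; ring
  rw [c1, c2, PySem.List.pyGet?_natCast, PySem.List.pyGetD_natCast,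
    List.getElem?_eq_getElem (by omega), Option.getD_some]
  unfold pvCell
  congr 1
  rw [List.getD_eq_getElem?_getD, List.getElem?_eq_getElem (by omega), Option.getD_some]

lemma totalB_eq (grid : List (List Int)) (w wn yn xn : Nat)
    (hrect : ∀ row ∈ grid, row.length = w)
    (hy : yn + wn ≤ grid.length) (hx : xn + wn ≤ w) :
    pvAt (pvBuildS grid w) ((yn : Int) + (wn : Int)) ((xn : Int) + (wn : Int))
      - pvAt (pvBuildS grid w) (yn : Int) ((xn : Int) + (wn : Int))
      - pvAt (pvBuildS grid w) ((yn : Int) + (wn : Int)) (xn : Int)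
      + pvAt (pvBuildS grid w) (yn : Int) (xn : Int)
    = ∑ k ∈ Finset.range wn, ∑ j ∈ Finset.range wn, pvCell grid (yn + k) (xn + j) := by
  have hat : ∀ i j : Nat, i ≤ grid.length → j ≤ w →
      pvAt (pvBuildS grid w) (i : Int) (j : Int) = pvBox grid i j := by
    intro i j hi hj
    unfold pvAt
    rw [buildS_eq grid w hrect, PySem.List.pyGetD_natCast, PySem.List.pyGetD_natCast,
      PySem.List.getD_map_range _ _ _ _ (show i < grid.length + 1 by omega),
      PySem.List.getD_map_range _ _ _ _ (show j < w + 1 by omega)]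
  have c1 : (yn : Int) + (wn : Int) = ((yn + wn : Nat) : Int) := by push_cast; ring
  have c2 : (xn : Int) + (wn : Int) = ((xn + wn : Nat) : Int) := by push_cast; ring
  rw [c1, c2, hat _ _ (by omega) (by omega), hat _ _ (by omega) (by omega),
    hat _ _ (by omega) (by omega), hat _ _ (by omega) (by omega)]
  exact box_diff grid yn xn wn

-- ===== VERDICT (by name: the statement is the Claim_ definition above) =====
theorem find_max_location_spec : Claim_equal_find_max_location := by
  unfold Claim_equal_find_max_location
  intro grid window _ hpre
  obtain ⟨hw0, hrect⟩ := hpre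
  obtain ⟨wn, rfl⟩ : ∃ wn : Nat, window = (wn : Int) :=
    ⟨window.toNat, (Int.toNat_of_nonneg hw0).symm⟩
  unfold Spec_find_max_location find_max_location find_max_location_alt
  by_cases hdeg : (grid.length : Int) - (wn : Int) ≤ 0 ∨ ((grid.headD []).length : Int) - (wn : Int) ≤ 0
  · rw [if_pos hdeg]
    rcases hdeg with hdeg | hdeg
    · rw [PySem.List.pyRange_one_eq_nil (a := 0) (b := (grid.length : Int) - (wn : Int)) (by omega),
        List.foldl_nil]
    · have hstep : ∀ (acc : Option Int × Option (Int × Int)),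
          ∀ y ∈ PySem.List.pyRange 0 ((grid.length : Int) - (wn : Int)) 1,
          (fun (st : Option Int × Option (Int × Int)) y =>
            let row := (PySem.List.pyGet? grid y).getD []
            (PySem.List.pyRange 0 ((row.length : Int) - (wn : Int)) 1).foldl
              (fun st x =>
                let power := (PySem.List.pyRange 0 (wn : Int) 1).foldl
                  (fun p dy => (PySem.List.pyRange 0 (wn : Int) 1).foldl
                    (fun p dx =>
                      p + PySem.List.pyGetD ((PySem.List.pyGet? grid (y + dy)).getD []) (x + dx) 0) p) 0
                match st.1 with
                | none => (some power, some (x, y))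
                | some greatest => if greatest < power then (some power, some (x, y)) else st) st)
            acc y = acc := by
        intro acc y hy
        rw [PySem.List.mem_pyRange_one] at hy
        obtain ⟨yn, rfl⟩ : ∃ yn : Nat, y = (yn : Int) :=
          ⟨y.toNat, (Int.toNat_of_nonneg hy.1).symm⟩
        have hyb : yn < grid.length := by
          have := hy.2; push_cast at this; omega
        have hrow : (PySem.List.pyGet? grid (yn : Int)).getD [] = grid.getD yn [] := by
          rw [PySem.List.pyGet?_natCast, List.getD_eq_getElem?_getD]
        have hrlen : (grid.getD yn []).length = (grid.headD []).length := by
          rw [List.getD_eq_getElem?_getD, List.getElem?_eq_getElem (by omega), Option.getD_some]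
          exact hrect _ (List.getElem_mem _)
        simp only [hrow, hrlen]
        rw [PySem.List.pyRange_one_eq_nil (a := 0)
          (b := (((grid.headD []).length : Nat) : Int) - (wn : Int)) (by omega), List.foldl_nil]
      rw [PySem.List.foldl_congr_mem _ _ (fun acc _ => acc) _ hstep]
      have : ∀ (l : List Int) (init : Option Int × Option (Int × Int)),
          l.foldl (fun acc _ => acc) init = init := by
        intro l init; induction l <;> simp [*]
      rw [this]
  · rw [if_neg hdeg]
    push Not at hdeg
    apply congrArg Prod.snd
    apply PySem.List.foldl_congr_mem
    intro acc y hy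
    rw [PySem.List.mem_pyRange_one] at hy
    obtain ⟨yn, rfl⟩ : ∃ yn : Nat, y = (yn : Int) :=
      ⟨y.toNat, (Int.toNat_of_nonneg hy.1).symm⟩
    have hyb : yn + wn ≤ grid.length := by
      have := hy.2; push_cast at this; omega
    have hrow : (PySem.List.pyGet? grid (yn : Int)).getD [] = grid.getD yn [] := by
      rw [PySem.List.pyGet?_natCast, List.getD_eq_getElem?_getD]
    have hrlen : (grid.getD yn []).length = (grid.headD []).length := by
      rw [List.getD_eq_getElem?_getD, List.getElem?_eq_getElem (by omega), Option.getD_some]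
      exact hrect _ (List.getElem_mem _)
    simp only [hrow, hrlen]
    apply PySem.List.foldl_congr_mem
    intro acc x hx
    rw [PySem.List.mem_pyRange_one] at hx
    obtain ⟨xn, rfl⟩ : ∃ xn : Nat, x = (xn : Int) :=
      ⟨x.toNat, (Int.toNat_of_nonneg hx.1).symm⟩
    have hxb : xn + wn ≤ (grid.headD []).length := by
      have := hx.2; push_cast at this; omega
    have hpt := (powerA_eq grid wn yn xn hyb).trans
      (totalB_eq grid (grid.headD []).length wn yn xn hrect hyb hxb).symm
    simp only [hpt]
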